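-- pv_equiv track=rewrite | github.com/ktaehyun/prepare_codingtest | 프로그래머스/lv3/12938. 최고의 집합/최고의 집합.py | solution
-- ===== SOURCE A (Python) =====
-- def solution(n, s):
--
--     if s // n < 1:
--         return [-1]
--
--     elif s % n != 0:
--         rest = s % n
--         value = s // n
--         answer = [ value for _ in range(n) ]
--         for i in range(n-1, n-1-rest, -1):
--             answer[i] += 1
--
--     else:
--         value = s // n
--         answer = [ value for _ in range(n) ]
--
--     return answer
-- ===== SOURCE B (Python) =====
-- def solution(n, s):
--     if s // n < 1:
--         return [-1]
--     out = []
--     while n > 0: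
--         v = -(-s // n)        # ceiling of s/n = current maximum element
--         out.append(v)
--         s -= v
--         n -= 1
--     out.reverse()
--     return out
-- ===== Notes on version B (the rewrite author's own statement) =====
-- stated objective: alternative
-- what changed: B replaces A's build-uniform-list-then-patch-last-rest-indices scheme by a greedy peeling loop: it repeatedly extracts the current maximum element as the ceiling -(-s//n), subtracts it from s, decrements n, and finally reverses the accumulated list; no remainder/divmod distribution remains.
import Mathlib
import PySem

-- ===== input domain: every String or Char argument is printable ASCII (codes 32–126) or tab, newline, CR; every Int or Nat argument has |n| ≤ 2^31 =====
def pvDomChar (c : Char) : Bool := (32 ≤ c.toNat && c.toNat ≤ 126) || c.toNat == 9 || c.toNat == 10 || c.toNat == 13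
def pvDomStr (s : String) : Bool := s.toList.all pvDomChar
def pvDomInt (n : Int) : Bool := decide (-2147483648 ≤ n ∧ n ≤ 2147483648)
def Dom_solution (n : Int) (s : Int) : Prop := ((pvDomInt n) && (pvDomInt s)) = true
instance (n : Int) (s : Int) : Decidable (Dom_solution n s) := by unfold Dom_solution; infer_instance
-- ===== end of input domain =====

-- B replaces A's build-then-patch scheme by a greedy peeling loop (take ceil(s/n),
-- subtract, decrement n, reverse at the end); objective: alternative algorithm.


-- ===== PORT A =====
-- literal transliteration of A; answer[i] += 1 is pySetD/pyGetD (every executed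
-- index is in range, so the total forms are exact here)
def solution (n : Int) (s : Int) : List Int :=
  if PySem.Int.floordiv s n < 1 then [-1]
  else if PySem.Int.mod s n ≠ 0 then
    let rest := PySem.Int.mod s n
    let value := PySem.Int.floordiv s n
    let answer := (PySem.List.pyRange 0 n 1).map (fun _ => value)
    (PySem.List.pyRange (n-1) (n-1-rest) (-1)).foldl
      (fun a i => PySem.List.pySetD a i (PySem.List.pyGetD a i 0 + 1)) answer
  else
    let value := PySem.Int.floordiv s n
    (PySem.List.pyRange 0 n 1).map (fun _ => value)

-- ===== PORT B =====
-- the while loop of Source B, fuel = number of remaining iterations (n counts down to 0)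
def solGreedyLoop (fuel : Nat) (n : Int) (s : Int) (out : List Int) : List Int :=
  match fuel with
  | 0 => out
  | k+1 =>
    if n > 0 then
      let v := -(PySem.Int.floordiv (-s) n)
      solGreedyLoop k (n - 1) (s - v) (out ++ [v])
    else out

def solution_alt (n : Int) (s : Int) : List Int :=
  if PySem.Int.floordiv s n < 1 then [-1]
  else (solGreedyLoop n.toNat n s []).reverse

-- ===== PRECONDITION & SPEC =====
-- n = 0 makes both Pythons raise ZeroDivisionError (s // n); A is total otherwise.
def Pre_solution (n : Int) (s : Int) : Prop := n ≠ 0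
instance (n : Int) (s : Int) : Decidable (Pre_solution n s) := by unfold Pre_solution; infer_instance
def pvWitness_solution : Int × Int := (5, 9)

def Spec_solution (n : Int) (s : Int) (out : List Int) : Prop := out = solution_alt n s
instance (n : Int) (s : Int) (out : List Int) : Decidable (Spec_solution n s out) := by unfold Spec_solution; infer_instance

-- ===== CLAIM (what is proved, stated in full; the proofs are below) =====
def Claim_equal_solution : Prop := ∀ (n : Int) (s : Int), Dom_solution n s → Pre_solution n s → Spec_solution n s (solution n s)

-- ===== LEMMAS AND PROOFS =====

-- one step of A's patch loop on the invariant shape: incrementing the last slot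
-- of the uniform prefix moves one element across the boundary
lemma patch_step (a : Nat) (v : Int) (t : List Int) (ha : 0 < a) :
    PySem.List.pySetD (List.replicate a v ++ t) ((a : Int) - 1)
      (PySem.List.pyGetD (List.replicate a v ++ t) ((a : Int) - 1) 0 + 1)
    = List.replicate (a - 1) v ++ (v + 1) :: t := by
  have hget : PySem.List.pyGetD (List.replicate a v ++ t) ((a : Int) - 1) 0 = v := by
    rw [PySem.List.pyGetD_eq_getElem _ _ (by omega) (by simp only [List.length_append, List.length_replicate]; push_cast; omega)]
    rw [List.getElem_append_left (by simp; omega)]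
    simp
  rw [hget, PySem.List.pySetD_of_nonneg _ _ (by omega),
      show ((a : Int) - 1).toNat = a - 1 by omega, List.set_append]
  conv_lhs => rw [show a = (a-1)+1 by omega, List.replicate_succ', List.set_append]
  simp

-- invariant of A's patch loop: after patching the k indices n-1-j, …, n-j-k,
-- the list is uniform v on the first n-j-k slots and v+1 on the last j+k
lemma patch_gen (n v : Int) : ∀ (k : Nat) (j : Int), 0 ≤ j → j + k ≤ n →
    (PySem.List.pyRange (n-1-j) (n-1-j-k) (-1)).foldl
      (fun a i => PySem.List.pySetD a i (PySem.List.pyGetD a i 0 + 1))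
      (List.replicate (n-j).toNat v ++ List.replicate j.toNat (v+1))
    = List.replicate (n-j-k).toNat v ++ List.replicate (j+k).toNat (v+1) := by
  intro k
  induction k with
  | zero =>
    intro j _ _
    rw [PySem.List.pyRange_neg_one_eq_nil (by omega)]
    simp
  | succ m ih =>
    intro j hj hjk
    push_cast at hjk ⊢
    rw [PySem.List.pyRange_neg_one_cons (by omega)]
    simp only [List.foldl_cons]
    have hstep := patch_step (n - j).toNat v (List.replicate j.toNat (v+1)) (by omega)
    rw [show (((n - j).toNat : Int)) - 1 = n - 1 - j by omega] at hstep
    rw [hstep]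
    have hcons : (v + 1) :: List.replicate j.toNat (v + 1)
        = List.replicate (j + 1).toNat (v + 1) := by
      rw [show (j + 1).toNat = j.toNat + 1 by omega, List.replicate_succ]
    rw [hcons, show (n - j).toNat - 1 = (n - (j+1)).toNat by omega,
        show (n - 1 - j - 1 : Int) = n - 1 - (j + 1) by ring,
        show (n - 1 - j - ((m : Int) + 1) : Int) = n - 1 - (j + 1) - m by ring,
        ih (j + 1) (by omega) (by omega),
        show (n - (j + 1) - (m : Int)).toNat = (n - j - ((m : Int) + 1)).toNat by omega,
        show (j + 1 + (m : Int)).toNat = (j + ((m : Int) + 1)).toNat by omega]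

-- the uniform comprehension [value for _ in range(n)] is a replicate
lemma range_map_const (n v : Int) :
    (PySem.List.pyRange 0 n 1).map (fun _ => v) = List.replicate n.toNat v := by
  rw [PySem.List.pyRange_one]
  simp [List.eq_replicate_iff]

-- greedy loop on an exactly divisible residual: peels q each step
lemma greedy_exact (q : Int) : ∀ (m : Nat) (out : List Int),
    solGreedyLoop m (m : Int) (q * m) out = out ++ List.replicate m q := by
  intro m
  induction m with
  | zero => intro out; simp [solGreedyLoop]
  | succ k ih =>
    intro out
    rw [solGreedyLoop, if_pos (by push_cast; omega)]
    have hv : -(PySem.Int.floordiv (-(q * ((k : Int) + 1))) ((k : Int) + 1)) = q := by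
      rw [PySem.Int.neg_floordiv_neg_eq_iff_of_pos (by omega)]
      constructor <;> nlinarith [Int.natCast_nonneg k]
    push_cast
    rw [hv, show (q * ((k : Int) + 1) - q) = q * k by ring,
        show ((k : Int) + 1 - 1) = (k : Int) by ring, ih]
    simp [List.append_assoc, List.replicate_succ]

-- greedy loop with residual r > 0: peels q+1 for the first r steps, then q
lemma greedy_gen (q : Int) : ∀ (r m : Nat) (out : List Int), r ≤ m →
    solGreedyLoop m (m : Int) (q * m + r) out
    = out ++ List.replicate r (q + 1) ++ List.replicate (m - r) q := by
  intro r
  induction r with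
  | zero => intro m out _; simp [greedy_exact]
  | succ j ih =>
    intro m out hrm
    obtain ⟨k, rfl⟩ : ∃ k, m = k + 1 := ⟨m - 1, by omega⟩
    rw [solGreedyLoop, if_pos (by push_cast; omega)]
    have hv : -(PySem.Int.floordiv (-(q * ((k : Int) + 1) + ((j : Int) + 1))) ((k : Int) + 1))
        = q + 1 := by
      rw [PySem.Int.neg_floordiv_neg_eq_iff_of_pos (by omega)]
      constructor <;> nlinarith [Int.natCast_nonneg k,
        show (j : Int) + 1 ≤ (k : Int) + 1 by exact_mod_cast Nat.cast_le.mpr hrm]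
    push_cast
    rw [hv, show (q * ((k : Int) + 1) + ((j : Int) + 1) - (q + 1)) = q * k + j by ring,
        show ((k : Int) + 1 - 1) = (k : Int) by ring]
    have := ih k (out ++ [q + 1]) (by omega)
    push_cast at this
    rw [this]
    simp [List.append_assoc, List.replicate_succ]

-- ===== VERDICT (by name: the statement is the Claim_ definition above) =====
theorem solution_spec : Claim_equal_solution := by
  intro n s _ hn
  unfold Spec_solution solution solution_alt
  set q := PySem.Int.floordiv s n with hq
  set r := PySem.Int.mod s n with hr
  by_cases hq1 : q < 1
  · simp [hq1]
  · simp only [if_neg hq1]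
    rcases lt_trichotomy n 0 with hneg | hzero | hpos
    · -- n < 0: A's lists are all empty, B's loop has fuel 0
      have hrb := PySem.Int.mod_neg_bounds s hneg
      rw [← hr] at hrb
      have h1 : (PySem.List.pyRange 0 n 1).map (fun _ => q) = ([] : List Int) := by
        rw [PySem.List.pyRange_one_eq_nil (by omega)]; rfl
      have h2 : solGreedyLoop n.toNat n s [] = [] := by
        rw [show n.toNat = 0 by omega]; rfl
      by_cases hr0 : r = 0
      · simp [hr0, h1, h2]
      · simp only [if_pos hr0, h1, h2]
        rw [PySem.List.pyRange_neg_one_eq_nil (by omega)]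
        simp
    · exact absurd hzero hn
    · -- n > 0
      have hr0le : 0 ≤ r := hr ▸ PySem.Int.mod_nonneg s hpos
      have hrlt : r < n := hr ▸ PySem.Int.mod_lt s hpos
      have hsum : q * n + r = s := by
        have := PySem.Int.floordiv_mul_add_mod s n
        rw [← hq, ← hr] at this; linarith
      have hB : (solGreedyLoop n.toNat n s []).reverse
          = List.replicate (n - r).toNat q ++ List.replicate r.toNat (q + 1) := by
        have hgen := greedy_gen q r.toNat n.toNat [] (by omega)
        rw [show ((n.toNat : Int)) = n by omega, show ((r.toNat : Int)) = r by omega,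
            hsum] at hgen
        rw [hgen]
        simp [List.reverse_replicate, show n.toNat - r.toNat = (n - r).toNat by omega]
      by_cases hr0 : r = 0
      · rw [if_neg (show ¬ r ≠ 0 from fun h => h hr0), range_map_const, hB]
        simp [hr0]
      · simp only [if_pos hr0]
        rw [range_map_const, hB]
        have h2 := patch_gen n q r.toNat 0 le_rfl (by omega)
        rw [show ((r.toNat : Int)) = r by omega] at h2
        simp only [sub_zero, zero_add, Int.toNat_zero, List.replicate_zero,
          List.append_nil] at h2
        exact h2
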